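-- pv_equiv track=rewrite | github.com/ThisLimn0/OpenWilly | tools/willy_re/willy_re/lingo/listparser.py | _trim_outer_brackets
-- ===== SOURCE A (Python) =====
-- class LingoListParserError(Exception):
--     pass
--
-- def _trim_outer_brackets(s: str) -> str | None:
--     """If s is wrapped in [...], return the inner content. Otherwise return s."""
--     if not s:
--         return None
--
--     bracket_pairs: list[dict] = []
--     current_pair = -1
--
--     for i, ch in enumerate(s):
--         if ch == "[":
--             bp_id = len(bracket_pairs)
--             bracket_pairs.append({"s": i, "e": None, "p": current_pair})
--             current_pair = bp_id
--         elif ch == "]":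
--             if current_pair == -1:
--                 raise LingoListParserError("Incorrectly nested brackets")
--             pair = bracket_pairs[current_pair]
--             current_pair = pair["p"]
--             pair["e"] = i
--
--     last = len(s) - 1
--     for pair in bracket_pairs:
--         if pair["s"] == 0 and pair["e"] == last:
--             return s[1:-1]
--
--     return s
-- ===== SOURCE B (Python) =====
-- class LingoListParserError(Exception):
--     pass
--
-- def _trim_outer_brackets(s: str) -> str | None:
--     """If s is wrapped in [...], return the inner content. Otherwise return s."""
--     if not s:
--         return None
--     stack = []          # start indices of currently open brackets
--     wrapped = False
--     last = len(s) - 1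
--     for i, ch in enumerate(s):
--         if ch == "[":
--             stack.append(i)
--         elif ch == "]":
--             if not stack:
--                 raise LingoListParserError("Incorrectly nested brackets")
--             start = stack.pop()
--             if start == 0 and i == last:
--                 wrapped = True
--     return s[1:-1] if wrapped else s
-- ===== Notes on version B (the rewrite author's own statement) =====
-- stated objective: simpler
-- what changed: Single pass keeping only a stack of open-bracket start indices and a boolean wrap flag, instead of building a persistent table of pair dicts with parent pointers and rescanning it after the loop; Pre_ excludes exactly the inputs with an unmatched closing bracket, on which both programs raise LingoListParserError.
-- outside the precondition, e.g. on _trim_outer_brackets(']'): A raises LingoListParserError, B raises LingoListParserError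
import Mathlib
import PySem

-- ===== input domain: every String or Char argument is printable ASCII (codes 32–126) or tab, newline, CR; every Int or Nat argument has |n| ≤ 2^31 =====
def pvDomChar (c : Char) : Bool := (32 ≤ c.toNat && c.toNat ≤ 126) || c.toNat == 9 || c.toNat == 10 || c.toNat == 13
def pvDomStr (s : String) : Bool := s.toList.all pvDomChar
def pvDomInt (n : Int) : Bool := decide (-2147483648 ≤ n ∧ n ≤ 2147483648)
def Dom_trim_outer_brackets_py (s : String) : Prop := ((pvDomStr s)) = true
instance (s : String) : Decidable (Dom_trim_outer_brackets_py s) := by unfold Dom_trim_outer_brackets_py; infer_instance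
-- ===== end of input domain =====

-- B keeps only a stack of open-bracket start indices and a wrap flag in one pass,
-- instead of A's persistent table of pair records (with parent pointers) plus a second scan.
-- Equivalence is about the return value; neither program mutates its argument.

-- ===== PORT A =====
-- the dict {"s": i, "e": None, "p": current_pair} has fixed keys; ported as a record
structure BPair where
  s : Int
  e : Option Int
  p : Int
deriving DecidableEq, Repr

-- the for-loop of A: state = (bracket_pairs, current_pair); none = raise LingoListParserError
def trimA_loop : List (Int × Char) → List BPair → Int → Option (List BPair)
  | [], pairs, _ => some pairs
  | (i, ch) :: rest, pairs, current =>
    if ch = '[' then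
      -- bp_id = len(bracket_pairs); append; current_pair = bp_id
      trimA_loop rest (pairs ++ [⟨i, none, current⟩]) ((pairs.length : Int))
    else if ch = ']' then
      if current = -1 then none   -- raise LingoListParserError("Incorrectly nested brackets")
      else
        match PySem.List.pyGet? pairs current with
        | none => none            -- unreachable: current_pair is always a valid table index
        | some pair => trimA_loop rest (pairs.set current.toNat { pair with e := some i }) pair.p
    else trimA_loop rest pairs current

-- A's second loop: "for pair in bracket_pairs: if pair['s']==0 and pair['e']==last: return s[1:-1]"
def trimA_find (last : Int) : List BPair → Bool
  | [] => false
  | q :: rest => if q.s = 0 ∧ q.e = some last then true else trimA_find last rest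

def trim_outer_brackets_py (s : String) : Option String :=
  if s.toList = [] then none
  else
    match trimA_loop (PySem.List.enumerate s.toList 0) [] (-1) with
    | none => none                -- LingoListParserError raised; excluded by Pre_
    | some pairs =>
      if trimA_find ((s.toList.length : Int) - 1) pairs then
        some (PySem.Str.slice s (some 1) (some (-1)))
      else some s

-- ===== PORT B =====
-- B's single loop: state = (stack of start indices, wrapped flag); none = raise
def trimB_loop (last : Int) : List (Int × Char) → List Int → Bool → Option Bool
  | [], _, wrapped => some wrapped
  | (i, ch) :: rest, stack, wrapped =>
    if ch = '[' then trimB_loop last rest (i :: stack) wrapped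
    else if ch = ']' then
      match stack with
      | [] => none                -- raise LingoListParserError("Incorrectly nested brackets")
      | start :: stk => trimB_loop last rest stk (wrapped || (start == 0 && i == last))
    else trimB_loop last rest stack wrapped

def trim_outer_brackets_py_alt (s : String) : Option String :=
  if s.toList = [] then none
  else
    match trimB_loop ((s.toList.length : Int) - 1) (PySem.List.enumerate s.toList 0) [] false with
    | none => none                -- LingoListParserError raised; excluded by Pre_
    | some wrapped =>
      if wrapped then some (PySem.Str.slice s (some 1) (some (-1))) else some s

-- ===== PRECONDITION & SPEC =====
-- Pre_ excludes exactly the inputs on which A raises LingoListParserError: a closing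
-- bracket with no open bracket before it (a prefix with more closers than openers).
def Pre_trim_outer_brackets_py (s : String) : Prop :=
  ∀ n, n ≤ s.toList.length → (s.toList.take n).count ']' ≤ (s.toList.take n).count '['
instance (s : String) : Decidable (Pre_trim_outer_brackets_py s) := by
  unfold Pre_trim_outer_brackets_py; infer_instance

def pvWitness_trim_outer_brackets_py : String := "[a]"

def Spec_trim_outer_brackets_py (s : String) (out : Option String) : Prop := out = trim_outer_brackets_py_alt s
instance (s : String) (out : Option String) : Decidable (Spec_trim_outer_brackets_py s out) := by unfold Spec_trim_outer_brackets_py; infer_instance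

-- ===== CLAIM (what is proved, stated in full; the proofs are below) =====
def Claim_equal_trim_outer_brackets_py : Prop := ∀ (s : String), Dom_trim_outer_brackets_py s → Pre_trim_outer_brackets_py s → Spec_trim_outer_brackets_py s (trim_outer_brackets_py s)

-- ===== LEMMAS AND PROOFS =====

-- "some pair in the table has s = 0 and e = last"
def ExiPair (pairs : List BPair) (last : Int) : Prop :=
  ∃ (j : Nat) (q : BPair), pairs[j]? = some q ∧ q.s = 0 ∧ q.e = some last

-- A's (bracket_pairs, current_pair) chain corresponds to B's stack:
-- the chain of still-open pairs reached through parent pointers carries exactly the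
-- stacked start indices, each open pair has e = None, and parent indices decrease.
inductive AChain : List BPair → Int → List Int → Prop
  | nil (pairs : List BPair) : AChain pairs (-1) []
  | cons (pairs : List BPair) (k : Nat) (pr : BPair) (stk : List Int) :
      pairs[k]? = some pr → pr.e = none → pr.p < (k : Int) →
      AChain pairs pr.p stk → AChain pairs (k : Int) (pr.s :: stk)

lemma AChain_lt {pairs : List BPair} {c : Int} {stk : List Int}
    (h : AChain pairs c stk) : c < (pairs.length : Int) := by
  cases h with
  | nil => omega
  | cons k pr stk hget _ _ _ =>
      have := (List.getElem?_eq_some_iff.mp hget).1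
      omega

lemma AChain_append {pairs : List BPair} {c : Int} {stk : List Int} (x : BPair)
    (h : AChain pairs c stk) : AChain (pairs ++ [x]) c stk := by
  induction h with
  | nil => exact AChain.nil _
  | cons k pr stk hget he hp _ ih =>
      refine AChain.cons _ k pr stk ?_ he hp ih
      have hk : k < pairs.length := (List.getElem?_eq_some_iff.mp hget).1
      rw [List.getElem?_append_left hk]; exact hget

lemma AChain_set_high {pairs : List BPair} {c : Int} {stk : List Int} {m : Nat} (x : BPair)
    (h : AChain pairs c stk) : c < (m : Int) → AChain (pairs.set m x) c stk := by
  induction h with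
  | nil => exact fun _ => AChain.nil _
  | cons k pr stk hget he hp _ ih =>
      intro hm
      refine AChain.cons _ k pr stk ?_ he hp (ih (by omega))
      rw [List.getElem?_set_ne (by omega)]
      exact hget

lemma ExiPair_nil (last : Int) : ¬ ExiPair [] last := by
  rintro ⟨j, q, hget, -, -⟩
  simp at hget

lemma ExiPair_append_none {pairs : List BPair} {x : BPair} (last : Int)
    (hx : x.e = none) : ExiPair (pairs ++ [x]) last ↔ ExiPair pairs last := by
  constructor
  · rintro ⟨j, q, hget, hs, he⟩
    rcases Nat.lt_or_ge j pairs.length with hj | hj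
    · exact ⟨j, q, by rw [List.getElem?_append_left hj] at hget; exact hget, hs, he⟩
    · exfalso
      rw [List.getElem?_append_right hj] at hget
      rcases Nat.eq_or_lt_of_le hj with hje | hje
      · simp [← hje] at hget
        subst hget
        rw [hx] at he; cases he
      · have : j - pairs.length ≥ 1 := by omega
        rw [List.getElem?_eq_none (by simp; omega)] at hget
        cases hget
  · rintro ⟨j, q, hget, hs, he⟩
    have hj : j < pairs.length := (List.getElem?_eq_some_iff.mp hget).1
    exact ⟨j, q, by rw [List.getElem?_append_left hj]; exact hget, hs, he⟩

lemma ExiPair_set {pairs : List BPair} {k : Nat} {pr : BPair} {i last : Int}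
    (hget : pairs[k]? = some pr) (he : pr.e = none) :
    ExiPair (pairs.set k { pr with e := some i }) last
      ↔ (ExiPair pairs last ∨ (pr.s = 0 ∧ i = last)) := by
  have hk : k < pairs.length := (List.getElem?_eq_some_iff.mp hget).1
  constructor
  · rintro ⟨j, q, hg, hs, hq⟩
    by_cases hjk : j = k
    · subst hjk
      rw [List.getElem?_set_self (by omega)] at hg
      cases hg
      exact Or.inr ⟨hs, by simpa using hq⟩
    · left
      exact ⟨j, q, by rw [List.getElem?_set_ne (by omega)] at hg; exact hg, hs, hq⟩
  · rintro (⟨j, q, hg, hs, hq⟩ | ⟨hs, hi⟩)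
    · have hjk : j ≠ k := by
        rintro rfl
        rw [hget] at hg; cases hg
        rw [he] at hq; cases hq
      exact ⟨j, q, by rw [List.getElem?_set_ne (by omega)]; exact hg, hs, hq⟩
    · exact ⟨k, { pr with e := some i },
        by rw [List.getElem?_set_self (by omega)], hs, by simp [hi]⟩

lemma trimA_find_iff (last : Int) (pairs : List BPair) :
    trimA_find last pairs = true ↔ ExiPair pairs last := by
  induction pairs with
  | nil => simp [trimA_find, ExiPair_nil]
  | cons q rest ih =>
      unfold trimA_find
      by_cases h : q.s = 0 ∧ q.e = some last
      · simp [h]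
        exact ⟨0, q, by simp, h.1, h.2⟩
      · simp [h, ih]
        constructor
        · rintro ⟨j, p, hg, hs, hq⟩
          exact ⟨j + 1, p, by simpa using hg, hs, hq⟩
        · rintro ⟨j, p, hg, hs, hq⟩
          cases j with
          | zero => simp at hg; exact absurd (by rw [hg]; exact ⟨hs, hq⟩) h
          | succ j => exact ⟨j, p, by simpa using hg, hs, hq⟩

lemma loop_agree (last : Int) (xs : List (Int × Char)) :
    ∀ (pairs : List BPair) (current : Int) (stack : List Int) (wrapped : Bool),
    AChain pairs current stack →
    (wrapped = true ↔ ExiPair pairs last) →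
    (trimA_loop xs pairs current = none ∧ trimB_loop last xs stack wrapped = none) ∨
    (∃ pairs' wrapped', trimA_loop xs pairs current = some pairs' ∧
      trimB_loop last xs stack wrapped = some wrapped' ∧
      (wrapped' = true ↔ ExiPair pairs' last)) := by
  induction xs with
  | nil =>
      intro pairs current stack wrapped _ hflag
      exact Or.inr ⟨pairs, wrapped, rfl, rfl, hflag⟩
  | cons x rest ih =>
      intro pairs current stack wrapped hrel hflag
      obtain ⟨i, ch⟩ := x
      by_cases hob : ch = '['
      · -- open bracket: append a pair / push the start index
        subst hob
        simp only [trimA_loop, trimB_loop, reduceIte]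
        refine ih _ _ _ _ ?_ ?_
        · have := AChain_lt hrel
          exact AChain.cons _ pairs.length ⟨i, none, current⟩ stack
            (by simp) rfl (by simpa using this) (AChain_append _ hrel)
        · rw [hflag, ExiPair_append_none last (by rfl)]
      · by_cases hcb : ch = ']'
        · subst hcb
          cases hrel with
          | nil =>
              -- current_pair == -1 and the stack is empty: both raise
              left
              constructor
              · simp [trimA_loop]
              · simp [trimB_loop]
          | cons k pr stk hget he hp hrel' =>
              have hgetp : PySem.List.pyGet? pairs (k : Int) = some pr := by
                rw [PySem.List.pyGet?_natCast]; exact hget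
              simp only [trimA_loop, trimB_loop, hgetp, Int.toNat_natCast,
                reduceIte, reduceCtorEq]
              refine ih _ _ _ _ ?_ ?_
              · exact AChain_set_high _ hrel' hp
              · rw [ExiPair_set hget he]
                constructor
                · intro h
                  rcases Bool.or_eq_true_iff.mp h with h | h
                  · exact Or.inl (hflag.mp h)
                  · right
                    have := Bool.and_eq_true_iff.mp h
                    exact ⟨by simpa using this.1, by simpa using this.2⟩
                · rintro (h | ⟨hs, hi⟩)
                  · exact Bool.or_eq_true_iff.mpr (Or.inl (hflag.mpr h))
                  · exact Bool.or_eq_true_iff.mpr (Or.inr (by simp [hs, hi]))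
        · simp only [trimA_loop, trimB_loop, if_neg hob, if_neg hcb]
          exact ih _ _ _ _ hrel hflag

-- under the prefix-balance precondition, B's loop never reaches its raise branch
lemma trimB_loop_ne_none (last : Int) :
    ∀ (xs : List (Int × Char)) (stack : List Int) (wrapped : Bool),
    (∀ n, n ≤ xs.length →
      ((xs.map Prod.snd).take n).count ']' ≤ stack.length + ((xs.map Prod.snd).take n).count '[') →
    trimB_loop last xs stack wrapped ≠ none := by
  intro xs
  induction xs with
  | nil => intro stack wrapped _; simp [trimB_loop]
  | cons x rest ih =>
      intro stack wrapped hcnt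
      obtain ⟨i, ch⟩ := x
      by_cases hob : ch = '['
      · subst hob
        simp only [trimB_loop, reduceIte]
        apply ih
        intro n hn
        have h := hcnt (n + 1) (by simpa using hn)
        simp [List.take_succ_cons] at h
        simp only [List.length_cons]
        omega
      · by_cases hcb : ch = ']'
        · subst hcb
          have h1 := hcnt 1 (by simp)
          simp only [List.map_cons, List.take_succ_cons, List.take_zero,
            List.count_cons, List.count_nil, beq_iff_eq] at h1
          cases stack with
          | nil => simp at h1
          | cons start stk =>
              simp only [trimB_loop, reduceIte]
              apply ih
              intro n hn
              have h := hcnt (n + 1) (by simpa using hn)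
              simp [List.take_succ_cons] at h
              omega
        · simp only [trimB_loop, if_neg hob, if_neg hcb]
          apply ih
          intro n hn
          have h := hcnt (n + 1) (by simpa using hn)
          simp [List.take_succ_cons, hob, hcb] at h
          omega

-- ===== VERDICT (by name: the statement is the Claim_ definition above) =====
theorem trim_outer_brackets_py_spec : Claim_equal_trim_outer_brackets_py := by
  intro s _ hpre
  unfold Spec_trim_outer_brackets_py trim_outer_brackets_py trim_outer_brackets_py_alt
  by_cases hempty : s.toList = []
  · simp [hempty]
  · simp only [if_neg hempty]
    have h := loop_agree ((s.toList.length : Int) - 1) (PySem.List.enumerate s.toList 0)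
      [] (-1) [] false (AChain.nil _) (by simp [ExiPair_nil])
    rcases h with ⟨hA, hB⟩ | ⟨pairs', wrapped', hA, hB, hflag⟩
    · -- impossible: Pre_ rules out the raise
      exfalso
      refine trimB_loop_ne_none ((s.toList.length : Int) - 1)
        (PySem.List.enumerate s.toList 0) [] false ?_ hB
      intro n hn
      have hm : (PySem.List.enumerate s.toList 0).map Prod.snd = s.toList := by
        simp [PySem.List.map_snd_enumerate]
      rw [hm]
      simp only [List.length_nil, Nat.zero_add]
      exact hpre n (by simpa [PySem.List.length_enumerate] using hn)
    · have hfind : trimA_find ((s.toList.length : Int) - 1) pairs' = wrapped' := by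
        cases hw : wrapped'
        · rw [Bool.eq_false_iff]
          intro ht
          have hx := (trimA_find_iff _ _).mp ht
          have := hflag.mpr hx
          rw [hw] at this
          cases this
        · exact (trimA_find_iff _ _).mpr (hflag.mp hw)
      rw [hA, hB]
      show (if trimA_find ((s.toList.length : Int) - 1) pairs' = true
              then some (PySem.Str.slice s (some 1) (some (-1))) else some s)
          = (if wrapped' = true
              then some (PySem.Str.slice s (some 1) (some (-1))) else some s)
      rw [hfind]
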